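-- pv_equiv track=rewrite | github.com/Timothy-py/100-PythonChallenges | Q82.py | morse_code_move
-- ===== SOURCE A (Python) =====
-- def morse_code_move(morse_code):
--     results = []
--     i = 0
--     while i < len(morse_code) - 1:
--         if morse_code[i] == '.' and morse_code[i+1] == '.':
--             new_code = morse_code[:i] + '--' + morse_code[i+2:]
--             results.append(new_code)
--             i += 2
--         else:
--             i += 1
--     return results
-- ===== SOURCE B (Python) =====
-- def morse_code_move(morse_code):
--     # zipper traversal: processed prefix + remaining suffix, no index arithmetic
--     results = []
--     before = ''
--     rest = morse_code
--     while rest: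
--         if rest.startswith('..'):
--             results.append(before + '--' + rest[2:])
--             before += '..'
--             rest = rest[2:]
--         else:
--             before += rest[0]
--             rest = rest[1:]
--     return results
-- ===== Notes on version B (the rewrite author's own statement) =====
-- stated objective: alternative
-- what changed: Replaced the index-and-slice while loop with a prefix/suffix zipper traversal that consumes the string and maintains the processed prefix, emitting the replacement string from the zipper state at each non-overlapping match.
import Mathlib
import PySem

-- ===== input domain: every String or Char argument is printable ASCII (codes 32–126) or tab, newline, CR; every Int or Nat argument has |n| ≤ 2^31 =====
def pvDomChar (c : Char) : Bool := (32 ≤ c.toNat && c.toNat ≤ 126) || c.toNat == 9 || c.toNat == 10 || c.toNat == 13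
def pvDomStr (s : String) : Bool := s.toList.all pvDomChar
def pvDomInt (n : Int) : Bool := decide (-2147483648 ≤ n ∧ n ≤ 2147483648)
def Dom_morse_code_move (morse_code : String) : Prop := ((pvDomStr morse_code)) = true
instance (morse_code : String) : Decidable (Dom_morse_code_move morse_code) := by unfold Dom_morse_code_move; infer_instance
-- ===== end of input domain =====

-- B replaces A's index-and-slice scan by a prefix/suffix zipper traversal (alternative decomposition; return values equal).

-- ===== PORT A =====
-- A's while loop: index i advances by 2 past a '..' match, else by 1.
def pvLoopA (s : List Char) (i : Nat) : List String :=
  if i + 1 < s.length then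
    if PySem.List.pyGet? s (i : Int) == some '.' && PySem.List.pyGet? s ((i : Int) + 1) == some '.' then
      String.ofList (PySem.List.slice s none (some (i : Int)) ++ ['-', '-'] ++
                 PySem.List.slice s (some ((i : Int) + 2)) none) :: pvLoopA s (i + 2)
    else pvLoopA s (i + 1)
  else []
termination_by s.length - i

def morse_code_move (morse_code : String) : List String :=
  pvLoopA morse_code.toList 0

-- ===== PORT B =====
-- B's while loop: zipper state (before, rest); consumes rest, extends before.
def pvLoopB (before rest : List Char) : List String :=
  match rest with
  | [] => []
  | c :: rest' =>
    if PySem.Chars.startswith (c :: rest') ['.', '.'] then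
      String.ofList (before ++ ['-', '-'] ++ (c :: rest').drop 2)
        :: pvLoopB (before ++ ['.', '.']) ((c :: rest').drop 2)
    else pvLoopB (before ++ [c]) rest'
termination_by rest.length
decreasing_by all_goals simp [List.drop]

def morse_code_move_alt (morse_code : String) : List String :=
  pvLoopB [] morse_code.toList

-- ===== PRECONDITION & SPEC =====
def Spec_morse_code_move (morse_code : String) (out : List String) : Prop := out = morse_code_move_alt morse_code
instance (morse_code : String) (out : List String) : Decidable (Spec_morse_code_move morse_code out) := by unfold Spec_morse_code_move; infer_instance

-- ===== CLAIM (what is proved, stated in full; the proofs are below) =====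
def Claim_equal_morse_code_move : Prop := ∀ (morse_code : String), Dom_morse_code_move morse_code → Spec_morse_code_move morse_code (morse_code_move morse_code)

-- ===== LEMMAS AND PROOFS =====
theorem pvKey (before rest : List Char) :
    pvLoopA (before ++ rest) before.length = pvLoopB before rest := by
  match rest with
  | [] => simp [pvLoopA, pvLoopB]
  | [c] => simp [pvLoopA, pvLoopB, PySem.Chars.startswith]
  | c1 :: c2 :: rs =>
    rw [pvLoopA, pvLoopB]
    have hlen : before.length + 1 < (before ++ c1 :: c2 :: rs).length := by simp
    rw [if_pos hlen]
    have hg1 : PySem.List.pyGet? (before ++ c1 :: c2 :: rs) (before.length : Int) = some c1 :=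
      PySem.List.pyGet?_append_length before (c2 :: rs) c1
    have hg2 : PySem.List.pyGet? (before ++ c1 :: c2 :: rs) ((before.length : Int) + 1) = some c2 := by
      have := PySem.List.pyGet?_append_right (pre := before) (ys := c1 :: c2 :: rs) (k := 1)
      simpa using this
    rw [hg1, hg2]
    have hs : PySem.Chars.startswith (c1 :: c2 :: rs) ['.', '.'] = (c1 == '.' && c2 == '.') := by
      simp [PySem.Chars.startswith, List.isPrefixOf, BEq.comm]
    rw [hs]
    by_cases h : (c1 == '.' && c2 == '.') = true
    · have hc1 : c1 = '.' := by have := h; simp at this; exact this.1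
      have hc2 : c2 = '.' := by have := h; simp at this; exact this.2
      subst hc1; subst hc2
      rw [if_pos (by simp), if_pos h]
      have hsl1 : PySem.List.slice (before ++ '.' :: '.' :: rs) none (some (before.length : Int)) = before := by
        rw [PySem.List.slice_to_natCast]; exact List.take_left ..
      have hsl2 : PySem.List.slice (before ++ '.' :: '.' :: rs) (some ((before.length : Int) + 2)) none = rs := by
        have hcast : ((before.length : Int) + 2) = (((before.length + 2 : Nat)) : Int) := by push_cast; ring
        rw [hcast, PySem.List.slice_from_natCast]
        have hassoc : before ++ '.' :: '.' :: rs = (before ++ ['.', '.']) ++ rs := by simp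
        rw [hassoc]
        simp
      rw [hsl1, hsl2]
      have hrec := pvKey (before ++ ['.', '.']) rs
      have hassoc : (before ++ ['.', '.']) ++ rs = before ++ '.' :: '.' :: rs := by simp
      rw [hassoc] at hrec
      simp at hrec
      rw [hrec]
      simp
    · rw [if_neg (by simpa using h), if_neg h]
      have hrec := pvKey (before ++ [c1]) (c2 :: rs)
      have hassoc : (before ++ [c1]) ++ c2 :: rs = before ++ c1 :: c2 :: rs := by simp
      rw [hassoc] at hrec
      simpa using hrec
termination_by rest.length

-- ===== VERDICT (by name: the statement is the Claim_ definition above) =====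
theorem morse_code_move_spec : Claim_equal_morse_code_move := by
  intro s _
  unfold Spec_morse_code_move morse_code_move morse_code_move_alt
  simpa using pvKey [] s.toList
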